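-- pv_equiv track=rewrite | github.com/mythdorm/relations_classifications | relations.py | make_antisymmetric_double
-- ===== SOURCE A (Python) =====
-- def make_antisymmetric_double(matrix):
--     missing_values = []
--
--     for row in range(len(matrix)):
--         for col in range(len(matrix)):
--             if matrix[row][col] == 1 and matrix[col][row] == 1:
--                 missing_values.append([col, row])
--
--     matrix_copy = matrix
--     for missing in missing_values:
--         matrix_copy[missing[0]][missing[1]] = 0
--     return matrix_copy
-- ===== SOURCE B (Python) =====
-- def make_antisymmetric_double(matrix):
--     # Single pure pass: each cell inside the n x n square whose symmetric
--     # partner is also 1 becomes 0; everything else is kept.  Unlike the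
--     # original, this builds a fresh matrix (the argument is not mutated);
--     # the return value is identical.
--     n = len(matrix)
--     return [
--         [0 if j < n and v == 1 and matrix[j][i] == 1 else v
--          for j, v in enumerate(row)]
--         for i, row in enumerate(matrix)
--     ]
-- ===== Notes on version B (the rewrite author's own statement) =====
-- stated objective: simpler
-- what changed: Replaces the collect-symmetric-pairs-then-zero two-phase in-place mutation with a single pure nested comprehension that computes every cell directly from the original matrix (no intermediate pair list, no mutation; return value only).
import Mathlib
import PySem

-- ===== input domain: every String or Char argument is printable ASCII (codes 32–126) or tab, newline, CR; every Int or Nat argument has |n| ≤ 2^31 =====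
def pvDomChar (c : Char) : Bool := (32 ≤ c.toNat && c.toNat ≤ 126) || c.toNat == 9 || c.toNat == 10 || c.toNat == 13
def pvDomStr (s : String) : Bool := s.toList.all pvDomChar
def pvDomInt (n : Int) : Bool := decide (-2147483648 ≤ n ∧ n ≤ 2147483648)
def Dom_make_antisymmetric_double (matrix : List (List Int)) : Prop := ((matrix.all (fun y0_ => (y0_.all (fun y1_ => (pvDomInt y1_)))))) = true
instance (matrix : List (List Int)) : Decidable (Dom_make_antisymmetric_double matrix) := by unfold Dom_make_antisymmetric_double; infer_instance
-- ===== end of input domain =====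

-- B replaces A's collect-symmetric-pairs-then-zero two-phase in-place mutation by one pure
-- nested comprehension; equivalence is about the RETURN value only (A mutates its argument, B does not).


-- ===== PORT A =====
-- matrix[i][j] for in-range non-negative indices (exact under Pre_, which keeps all accesses in range)
def pvGet2 (m : List (List Int)) (i j : Nat) : Int := (m.getD i []).getD j 0

-- the nested collection loop of A ('missing_values'), pairs (col, row) in append order
def pvMissing (matrix : List (List Int)) : List (Nat × Nat) :=
  (List.range matrix.length).foldl (fun acc row =>
    (List.range matrix.length).foldl (fun acc col =>
      if pvGet2 matrix row col == 1 && pvGet2 matrix col row == 1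
      then acc ++ [(col, row)] else acc) acc) []

-- matrix_copy[p.1][p.2] = 0
def pvZero (mc : List (List Int)) (p : Nat × Nat) : List (List Int) :=
  mc.set p.1 ((mc.getD p.1 []).set p.2 0)

def make_antisymmetric_double (matrix : List (List Int)) : List (List Int) :=
  (pvMissing matrix).foldl pvZero matrix

-- ===== PORT B =====
def make_antisymmetric_double_alt (matrix : List (List Int)) : List (List Int) :=
  let n := matrix.length
  (PySem.List.enumerate matrix).map (fun irow =>
    (PySem.List.enumerate irow.2).map (fun jv =>
      if jv.1 < (n : Int) && jv.2 == 1 && pvGet2 matrix jv.1.toNat irow.1.toNat == 1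
      then 0 else jv.2))

-- ===== PRECONDITION & SPEC =====
-- A indexes matrix[row][col] for all row, col < len(matrix): it raises IndexError exactly when
-- some row is shorter than len(matrix); Pre_ excludes exactly those inputs.
def Pre_make_antisymmetric_double (matrix : List (List Int)) : Prop :=
  ∀ row ∈ matrix, matrix.length ≤ row.length
instance (matrix : List (List Int)) : Decidable (Pre_make_antisymmetric_double matrix) := by
  unfold Pre_make_antisymmetric_double; infer_instance
def pvWitness_make_antisymmetric_double : List (List Int) := [[1, 0], [0, 1]]
def Spec_make_antisymmetric_double (matrix : List (List Int)) (out : List (List Int)) : Prop := out = make_antisymmetric_double_alt matrix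
instance (matrix : List (List Int)) (out : List (List Int)) : Decidable (Spec_make_antisymmetric_double matrix out) := by unfold Spec_make_antisymmetric_double; infer_instance

-- ===== CLAIM (what is proved, stated in full; the proofs are below) =====
def Claim_equal_make_antisymmetric_double : Prop := ∀ (matrix : List (List Int)), Dom_make_antisymmetric_double matrix → Pre_make_antisymmetric_double matrix → Spec_make_antisymmetric_double matrix (make_antisymmetric_double matrix)

-- ===== LEMMAS AND PROOFS =====

lemma pvMissing_eq_flatMap (matrix : List (List Int)) :
    pvMissing matrix =
      (List.range matrix.length).flatMap (fun row =>
        ((List.range matrix.length).filter (fun col =>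
          pvGet2 matrix row col == 1 && pvGet2 matrix col row == 1)).map (fun col => (col, row))) := by
  unfold pvMissing
  simp only [PySem.List.foldl_append_if, PySem.List.foldl_append_eq_flatMap, List.nil_append]

lemma mem_pvMissing (matrix : List (List Int)) (p : Nat × Nat) :
    p ∈ pvMissing matrix ↔
      p.1 < matrix.length ∧ p.2 < matrix.length ∧
      pvGet2 matrix p.2 p.1 = 1 ∧ pvGet2 matrix p.1 p.2 = 1 := by
  rw [pvMissing_eq_flatMap]
  simp only [List.mem_flatMap, List.mem_map, List.mem_filter, List.mem_range]
  constructor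
  · rintro ⟨row, hrow, col, ⟨hcol, hc⟩, rfl⟩
    simp only [Bool.and_eq_true, beq_iff_eq] at hc
    exact ⟨hcol, hrow, hc.1, hc.2⟩
  · rintro ⟨h1, h2, h3, h4⟩
    exact ⟨p.2, h2, p.1, ⟨h1, by simp [h3, h4]⟩, rfl⟩

lemma pvZero_length (m : List (List Int)) (p : Nat × Nat) : (pvZero m p).length = m.length := by
  simp [pvZero]

lemma pvZero_row_length (m : List (List Int)) (p : Nat × Nat) (i : Nat) :
    ((pvZero m p).getD i []).length = (m.getD i []).length := by
  simp only [pvZero, List.getD_eq_getElem?_getD, List.getElem?_set]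
  split_ifs with h1 h2
  · subst h1; simp
  · subst h1; simp [List.getElem?_eq_none (le_of_not_gt h2)]
  · rfl

lemma pvZero_get (m : List (List Int)) (p : Nat × Nat)
    (h1 : p.1 < m.length) (h2 : p.2 < (m.getD p.1 []).length) (i j : Nat) :
    pvGet2 (pvZero m p) i j = if i = p.1 ∧ j = p.2 then 0 else pvGet2 m i j := by
  have h2' : p.2 < (m[p.1]?.getD []).length := by
    simpa [List.getD_eq_getElem?_getD] using h2
  simp only [pvZero, pvGet2, List.getD_eq_getElem?_getD, List.getElem?_set]
  by_cases hi : p.1 = i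
  · subst hi
    rw [if_pos rfl, if_pos h1, Option.getD_some, List.getElem?_set]
    by_cases hj : p.2 = j
    · subst hj
      simp [h2']
    · have hc : ¬(p.1 = p.1 ∧ j = p.2) := fun h => hj h.2.symm
      simp [hj]
      exact fun h => absurd h.symm hj
  · have hc : ¬(i = p.1 ∧ j = p.2) := fun h => hi h.1.symm
    simp [hi, hc]

lemma pvFoldZero (L : List (Nat × Nat)) (m : List (List Int))
    (hL : ∀ p ∈ L, p.1 < m.length ∧ p.2 < (m.getD p.1 []).length) :
    (L.foldl pvZero m).length = m.length ∧
    (∀ i, ((L.foldl pvZero m).getD i []).length = (m.getD i []).length) ∧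
    (∀ i j, pvGet2 (L.foldl pvZero m) i j = if (i, j) ∈ L then 0 else pvGet2 m i j) := by
  induction L generalizing m with
  | nil => simp
  | cons p rest ih =>
    have hp := hL p (List.mem_cons_self)
    have hL' : ∀ q ∈ rest, q.1 < (pvZero m p).length ∧ q.2 < ((pvZero m p).getD q.1 []).length := by
      intro q hq
      have := hL q (List.mem_cons_of_mem _ hq)
      rw [pvZero_length, pvZero_row_length]
      exact this
    obtain ⟨ihlen, ihrow, ihval⟩ := ih (pvZero m p) hL'
    refine ⟨by simpa [pvZero_length] using ihlen, ?_, ?_⟩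
    · intro i
      rw [List.foldl_cons, ihrow i, pvZero_row_length]
    · intro i j
      rw [List.foldl_cons, ihval i j, pvZero_get m p hp.1 hp.2 i j]
      by_cases hr : (i, j) ∈ rest
      · simp [hr]
      · by_cases he : (i, j) = p
        · have : i = p.1 ∧ j = p.2 := by cases p; cases he; exact ⟨rfl, rfl⟩
          simp [this]
        · have : ¬(i = p.1 ∧ j = p.2) := by
            rintro ⟨h1, h2⟩; exact he (by cases p; simp_all)
          simp [hr, he, this]

lemma pvGet2_eq_getElem (m : List (List Int)) (i j : Nat)
    (hi : i < m.length) (hj : j < m[i].length) : pvGet2 m i j = m[i][j] := by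
  simp [pvGet2, List.getD_eq_getElem?_getD, List.getElem?_eq_getElem hi,
    List.getElem?_eq_getElem hj]

-- ===== VERDICT (by name: the statement is the Claim_ definition above) =====
theorem make_antisymmetric_double_spec : Claim_equal_make_antisymmetric_double := by
  intro matrix _hdom hpre
  unfold Spec_make_antisymmetric_double
  have hgetD : ∀ (i : Nat) (h : i < matrix.length), matrix.getD i [] = matrix[i] := by
    intro i h
    simp [List.getD_eq_getElem?_getD, List.getElem?_eq_getElem h]
  have hrow_le : ∀ i, i < matrix.length → matrix.length ≤ (matrix.getD i []).length := by
    intro i hi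
    rw [hgetD i hi]
    exact hpre _ (List.getElem_mem hi)
  have hL : ∀ p ∈ pvMissing matrix, p.1 < matrix.length ∧ p.2 < (matrix.getD p.1 []).length := by
    intro p hp
    obtain ⟨hp1, hp2, -, -⟩ := (mem_pvMissing matrix p).1 hp
    exact ⟨hp1, lt_of_lt_of_le hp2 (hrow_le p.1 hp1)⟩
  obtain ⟨hlen, hrowlen, hval⟩ := pvFoldZero (pvMissing matrix) matrix hL
  unfold make_antisymmetric_double make_antisymmetric_double_alt
  apply List.ext_getElem
  · simp [hlen, PySem.List.length_enumerate]
  · intro i hi1 hi2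
    have hin : i < matrix.length := by rwa [hlen] at hi1
    have hAi : ((pvMissing matrix).foldl pvZero matrix)[i] =
        ((pvMissing matrix).foldl pvZero matrix).getD i [] := by
      simp [List.getD_eq_getElem?_getD, List.getElem?_eq_getElem hi1]
    have hBi : ((PySem.List.enumerate matrix).map (fun irow =>
          (PySem.List.enumerate irow.2).map (fun jv =>
            if jv.1 < (matrix.length : Int) && jv.2 == 1 &&
                pvGet2 matrix jv.1.toNat irow.1.toNat == 1
            then 0 else jv.2)))[i] =
        (PySem.List.enumerate matrix[i]).map (fun jv =>
            if jv.1 < (matrix.length : Int) && jv.2 == 1 &&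
                pvGet2 matrix jv.1.toNat ((0 : Int) + i).toNat == 1
            then 0 else jv.2) := by
      simp [PySem.List.getElem_enumerate]
    simp only []
    rw [hBi, hAi]
    apply List.ext_getElem
    · rw [hrowlen i, hgetD i hin]
      simp [PySem.List.length_enumerate]
    · intro j hj1 hj2
      have hjrow : j < matrix[i].length := by
        rwa [hrowlen i, hgetD i hin] at hj1
      have hgd : (((pvMissing matrix).foldl pvZero matrix).getD i [])[j] =
          pvGet2 ((pvMissing matrix).foldl pvZero matrix) i j :=
        (List.getD_eq_getElem _ 0 hj1).symm
      rw [hgd, hval i j]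
      have hBj : ((PySem.List.enumerate matrix[i]).map (fun jv =>
            if jv.1 < (matrix.length : Int) && jv.2 == 1 &&
                pvGet2 matrix jv.1.toNat ((0 : Int) + i).toNat == 1
            then 0 else jv.2))[j] =
          (if (j : Int) < (matrix.length : Int) && matrix[i][j] == 1 &&
              pvGet2 matrix j i == 1
           then 0 else matrix[i][j]) := by
        simp [PySem.List.getElem_enumerate]
      rw [hBj]
      have hmm : matrix[i][j] = pvGet2 matrix i j :=
        (pvGet2_eq_getElem matrix i j hin hjrow).symm
      rw [hmm]
      simp only [mem_pvMissing]
      by_cases hjn : j < matrix.length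
      · by_cases c1 : pvGet2 matrix i j = 1 <;> by_cases c2 : pvGet2 matrix j i = 1 <;>
          simp [hin, hjn, c1, c2]
      · have : ¬((j : Int) < (matrix.length : Int)) := by exact_mod_cast hjn
        simp [hjn, this]
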